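-- pv_equiv track=rewrite | github.com/nazjaz/everyday-python-scripts | file-summary-reporter/src/main.py | _categorize_file_type
-- ===== SOURCE A (Python) =====
-- def _categorize_file_type(extension: str) -> str:
--     """Categorize file by extension into type groups.
--
--     Args:
--         extension: File extension (with dot).
--
--     Returns:
--         File type category.
--     """
--     type_mapping = {
--         "image": [".jpg", ".jpeg", ".png", ".gif", ".bmp", ".svg", ".webp"],
--         "document": [
--             ".pdf",
--             ".doc",
--             ".docx",
--             ".txt",
--             ".rtf",
--             ".odt",
--             ".pages",
--         ],
--         "spreadsheet": [".xls", ".xlsx", ".csv", ".ods", ".numbers"],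
--         "video": [".mp4", ".avi", ".mov", ".mkv", ".wmv", ".flv", ".webm"],
--         "audio": [".mp3", ".wav", ".flac", ".aac", ".ogg", ".m4a"],
--         "archive": [".zip", ".rar", ".7z", ".tar", ".gz", ".bz2"],
--         "code": [
--             ".py",
--             ".js",
--             ".java",
--             ".cpp",
--             ".c",
--             ".html",
--             ".css",
--             ".xml",
--             ".json",
--         ],
--         "executable": [".exe", ".app", ".deb", ".rpm", ".dmg"],
--     }
--
--     for file_type, extensions in type_mapping.items():
--         if extension in extensions:
--             return file_type
--
--     return "other"
-- ===== SOURCE B (Python) =====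
-- _EXT_TO_TYPE = {
--     ".jpg": "image", ".jpeg": "image", ".png": "image", ".gif": "image",
--     ".bmp": "image", ".svg": "image", ".webp": "image",
--     ".pdf": "document", ".doc": "document", ".docx": "document",
--     ".txt": "document", ".rtf": "document", ".odt": "document",
--     ".pages": "document",
--     ".xls": "spreadsheet", ".xlsx": "spreadsheet", ".csv": "spreadsheet",
--     ".ods": "spreadsheet", ".numbers": "spreadsheet",
--     ".mp4": "video", ".avi": "video", ".mov": "video", ".mkv": "video",
--     ".wmv": "video", ".flv": "video", ".webm": "video",
--     ".mp3": "audio", ".wav": "audio", ".flac": "audio", ".aac": "audio",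
--     ".ogg": "audio", ".m4a": "audio",
--     ".zip": "archive", ".rar": "archive", ".7z": "archive",
--     ".tar": "archive", ".gz": "archive", ".bz2": "archive",
--     ".py": "code", ".js": "code", ".java": "code", ".cpp": "code",
--     ".c": "code", ".html": "code", ".css": "code", ".xml": "code",
--     ".json": "code",
--     ".exe": "executable", ".app": "executable", ".deb": "executable",
--     ".rpm": "executable", ".dmg": "executable",
-- }
--
--
-- def _categorize_file_type(extension: str) -> str:
--     """Categorize file by extension into type groups."""
--     return _EXT_TO_TYPE.get(extension, "other")
-- ===== Notes on version B (the rewrite author's own statement) =====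
-- stated objective: idiomatic
-- what changed: Replaces the per-category membership-scan loop with a module-level flat literal dict mapping each extension directly to its category, so the function body is a single dict lookup with a default fallback category.
import Mathlib
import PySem

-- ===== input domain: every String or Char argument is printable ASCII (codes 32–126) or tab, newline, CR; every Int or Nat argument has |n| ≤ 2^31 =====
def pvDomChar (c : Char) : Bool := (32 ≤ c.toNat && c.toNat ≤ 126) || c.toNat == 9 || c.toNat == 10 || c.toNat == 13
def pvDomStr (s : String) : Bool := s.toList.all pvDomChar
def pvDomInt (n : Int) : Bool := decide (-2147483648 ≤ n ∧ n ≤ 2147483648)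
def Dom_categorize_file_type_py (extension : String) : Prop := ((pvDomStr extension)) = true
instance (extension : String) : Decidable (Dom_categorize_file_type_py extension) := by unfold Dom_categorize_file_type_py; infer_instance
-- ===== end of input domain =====

-- B replaces A's per-category membership-scan loop by a module-level flat literal
-- dict (extension -> category) queried once with get(..., "other") — more idiomatic.

-- ===== PORT A =====
-- the literal type_mapping dict of A, as an insertion-ordered association list
def pvTypeMapping : List (String × List String) :=
  [ ("image", [".jpg", ".jpeg", ".png", ".gif", ".bmp", ".svg", ".webp"]),
    ("document", [".pdf", ".doc", ".docx", ".txt", ".rtf", ".odt", ".pages"]),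
    ("spreadsheet", [".xls", ".xlsx", ".csv", ".ods", ".numbers"]),
    ("video", [".mp4", ".avi", ".mov", ".mkv", ".wmv", ".flv", ".webm"]),
    ("audio", [".mp3", ".wav", ".flac", ".aac", ".ogg", ".m4a"]),
    ("archive", [".zip", ".rar", ".7z", ".tar", ".gz", ".bz2"]),
    ("code", [".py", ".js", ".java", ".cpp", ".c", ".html", ".css", ".xml", ".json"]),
    ("executable", [".exe", ".app", ".deb", ".rpm", ".dmg"]) ]

-- A's loop: 'for file_type, extensions in type_mapping.items(): if extension in extensions: return file_type'
def pvScanA : List (String × List String) → String → String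
  | [], _ => "other"
  | (t, exts) :: rest, e => if exts.contains e then t else pvScanA rest e

def categorize_file_type_py (extension : String) : String :=
  pvScanA pvTypeMapping extension

-- ===== PORT B =====
-- B's module-level flat literal dict _EXT_TO_TYPE, pair for pair in source order
def pvExtToType : PySem.Dict String String :=
  PySem.Dict.ofList
    [ (".jpg", "image"), (".jpeg", "image"), (".png", "image"), (".gif", "image"),
      (".bmp", "image"), (".svg", "image"), (".webp", "image"),
      (".pdf", "document"), (".doc", "document"), (".docx", "document"),
      (".txt", "document"), (".rtf", "document"), (".odt", "document"),
      (".pages", "document"),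
      (".xls", "spreadsheet"), (".xlsx", "spreadsheet"), (".csv", "spreadsheet"),
      (".ods", "spreadsheet"), (".numbers", "spreadsheet"),
      (".mp4", "video"), (".avi", "video"), (".mov", "video"), (".mkv", "video"),
      (".wmv", "video"), (".flv", "video"), (".webm", "video"),
      (".mp3", "audio"), (".wav", "audio"), (".flac", "audio"), (".aac", "audio"),
      (".ogg", "audio"), (".m4a", "audio"),
      (".zip", "archive"), (".rar", "archive"), (".7z", "archive"),
      (".tar", "archive"), (".gz", "archive"), (".bz2", "archive"),
      (".py", "code"), (".js", "code"), (".java", "code"), (".cpp", "code"),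
      (".c", "code"), (".html", "code"), (".css", "code"), (".xml", "code"),
      (".json", "code"),
      (".exe", "executable"), (".app", "executable"), (".deb", "executable"),
      (".rpm", "executable"), (".dmg", "executable") ]

def categorize_file_type_py_alt (extension : String) : String :=
  pvExtToType.getD extension "other"

-- ===== PRECONDITION & SPEC =====
def Spec_categorize_file_type_py (extension : String) (out : String) : Prop := out = categorize_file_type_py_alt extension
instance (extension : String) (out : String) : Decidable (Spec_categorize_file_type_py extension out) := by unfold Spec_categorize_file_type_py; infer_instance

-- ===== CLAIM (what is proved, stated in full; the proofs are below) =====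
def Claim_equal_categorize_file_type_py : Prop := ∀ (extension : String), Dom_categorize_file_type_py extension → Spec_categorize_file_type_py extension (categorize_file_type_py extension)

-- ===== LEMMAS AND PROOFS =====

-- first-match lookup in a block of pairs (x, t) is exactly the membership scan of that block
lemma get?_mk_map_append (exts : List String) (t : String) (tail : List (String × String)) (e : String) :
    (PySem.Dict.mk (exts.map (fun x => (x, t)) ++ tail)).get? e
      = if e ∈ exts then some t else (PySem.Dict.mk tail).get? e := by
  induction exts with
  | nil => simp
  | cons x xs ih =>
      by_cases hx : x = e
      · subst hx; simp [PySem.Dict.get?_mk_cons]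
      · simp [PySem.Dict.get?_mk_cons, ih, hx, Ne.symm hx]

-- A's category scan equals first-match lookup in the flattened reverse list
lemma scan_eq_lookup (m : List (String × List String)) (e : String) :
    pvScanA m e
      = ((PySem.Dict.mk (m.flatMap (fun p => p.2.map (fun x => (x, p.1))))).get? e).getD "other" := by
  induction m with
  | nil => simp [pvScanA, PySem.Dict.get?]
  | cons p rest ih =>
      obtain ⟨t, exts⟩ := p
      simp only [pvScanA, List.flatMap_cons, get?_mk_map_append]
      by_cases h : e ∈ exts <;> simp [h, ih]

-- building a dict from pairs with pairwise-distinct keys just records the pair list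
lemma ofList_eq_mk_of_nodup (l : List (String × String)) (h1 : (l.map Prod.fst).Nodup) :
    PySem.Dict.ofList l = PySem.Dict.mk l := by
  apply PySem.Dict.ext
  simp only [PySem.Dict.ofList, PySem.Dict.update]
  rw [PySem.Dict.items_foldl_insert_fresh (k := Prod.fst) (v := Prod.snd)] <;>
    simp [PySem.Dict.empty, h1]

set_option maxRecDepth 4000 in
-- B's flat literal table is exactly A's mapping flattened, and its 52 keys are distinct
lemma extToType_eq_mk :
    pvExtToType = PySem.Dict.mk (pvTypeMapping.flatMap (fun p => p.2.map (fun e => (e, p.1)))) := by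
  have h := ofList_eq_mk_of_nodup (pvTypeMapping.flatMap (fun p => p.2.map (fun e => (e, p.1)))) (by decide)
  have hl : pvExtToType = PySem.Dict.ofList (pvTypeMapping.flatMap (fun p => p.2.map (fun e => (e, p.1)))) := by
    unfold pvExtToType; decide
  rw [hl, h]

-- ===== VERDICT (by name: the statement is the Claim_ definition above) =====
theorem categorize_file_type_py_spec : Claim_equal_categorize_file_type_py := by
  intro e _
  unfold Spec_categorize_file_type_py categorize_file_type_py categorize_file_type_py_alt
  rw [extToType_eq_mk, scan_eq_lookup]
  simp [PySem.Dict.getD]
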